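-- pv_equiv track=rewrite | github.com/wonuseo/news_monitoring | scripts/delete_total_result_before_202602.py | find_date_column_index
-- ===== SOURCE A (Python) =====
-- from typing import Iterable, List, Optional
--
-- DATE_COLUMN_PRIORITY = [
--     "pubDate",
--     "pub_datetime",
--     "date_only",
--     "pub_date",
--     "published_at",
--     "date",
-- ]
--
-- def find_date_column_index(headers: Iterable[str]) -> Optional[int]:
--     normalized = [
--         header.strip().lower() if isinstance(header, str) else "" for header in headers
--     ]
--     for candidate in DATE_COLUMN_PRIORITY:
--         candidate_lower = candidate.lower()
--         for idx, header in enumerate(normalized):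
--             if header == candidate_lower:
--                 return idx
--     return None
-- ===== SOURCE B (Python) =====
-- from typing import Iterable, Optional
--
-- DATE_COLUMN_PRIORITY = [
--     "pubDate",
--     "pub_datetime",
--     "date_only",
--     "pub_date",
--     "published_at",
--     "date",
-- ]
--
-- def find_date_column_index(headers: Iterable[str]) -> Optional[int]:
--     # Single header-major pass: rank each header by its priority position and
--     # keep the best (lowest-rank, earliest) match seen so far.
--     best = None  # (rank, idx) with the smallest rank; earliest index wins ties
--     for idx, header in enumerate(headers):
--         key = header.strip().lower() if isinstance(header, str) else ""
--         for rank, candidate in enumerate(DATE_COLUMN_PRIORITY):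
--             if key == candidate.lower():
--                 if best is None or rank < best[0]:
--                     best = (rank, idx)
--                 break
--     return None if best is None else best[1]
-- ===== Notes on version B (the rewrite author's own statement) =====
-- stated objective: alternative
-- what changed: A scans candidate-major with an early return (for each priority candidate, rescan all headers); B makes one header-major pass, ranking each header by its priority position and keeping the minimal (rank, index) pair in an accumulator.
import Mathlib
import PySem

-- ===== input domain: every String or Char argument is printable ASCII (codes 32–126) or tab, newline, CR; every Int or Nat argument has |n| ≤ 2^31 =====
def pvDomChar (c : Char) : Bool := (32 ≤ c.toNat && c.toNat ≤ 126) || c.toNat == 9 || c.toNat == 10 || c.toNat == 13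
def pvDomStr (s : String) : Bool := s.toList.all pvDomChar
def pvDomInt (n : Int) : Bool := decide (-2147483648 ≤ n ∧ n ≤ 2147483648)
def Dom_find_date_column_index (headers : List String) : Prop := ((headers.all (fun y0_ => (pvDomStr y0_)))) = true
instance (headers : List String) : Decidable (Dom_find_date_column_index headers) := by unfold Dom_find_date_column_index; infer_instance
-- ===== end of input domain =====

-- B replaces A's candidate-major early-return scans by a single header-major pass
-- keeping the minimal (rank, index) pair (alternative decomposition; return value proved equal).

-- ===== PORT A =====
def DATE_COLUMN_PRIORITY : List String :=
  ["pubDate", "pub_datetime", "date_only", "pub_date", "published_at", "date"]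

-- inner 'for idx, header in enumerate(normalized): if header == candidate_lower: return idx'
def aScan (c : String) (l : List String) (i : Int) : Option Int :=
  match l with
  | [] => none
  | h :: t => if h = c then some i else aScan c t (i + 1)

-- outer 'for candidate in DATE_COLUMN_PRIORITY'
def aLoop (cands : List String) (normalized : List String) : Option Int :=
  match cands with
  | [] => none
  | c :: cs =>
    match aScan (PySem.Str.lower c) normalized 0 with
    | some i => some i
    | none => aLoop cs normalized

def find_date_column_index (headers : List String) : Option Int :=
  let normalized := headers.map (fun h => PySem.Str.lower (PySem.Str.strip h))
  aLoop DATE_COLUMN_PRIORITY normalized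

-- ===== PORT B =====
-- 'for rank, candidate in enumerate(DATE_COLUMN_PRIORITY): if key == candidate.lower(): … break'
def bRank (cands : List String) (k : String) (r : Int) : Option Int :=
  match cands with
  | [] => none
  | c :: cs => if k = PySem.Str.lower c then some r else bRank cs k (r + 1)

-- 'for idx, header in enumerate(headers): …' keeping best = smallest (rank, idx)
def bLoop (cands : List String) (hs : List String) (i : Int) (best : Option (Int × Int)) :
    Option (Int × Int) :=
  match hs with
  | [] => best
  | h :: t =>
    let key := PySem.Str.lower (PySem.Str.strip h)
    let best' :=
      match bRank cands key 0 with
      | none => best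
      | some r =>
        match best with
        | none => some (r, i)
        | some b => if r < b.1 then some (r, i) else some b
    bLoop cands t (i + 1) best'

def find_date_column_index_alt (headers : List String) : Option Int :=
  (bLoop DATE_COLUMN_PRIORITY headers 0 none).map Prod.snd

-- ===== PRECONDITION & SPEC =====
def Spec_find_date_column_index (headers : List String) (out : Option Int) : Prop := out = find_date_column_index_alt headers
instance (headers : List String) (out : Option Int) : Decidable (Spec_find_date_column_index headers out) := by unfold Spec_find_date_column_index; infer_instance

-- ===== CLAIM (what is proved, stated in full; the proofs are below) =====
def Claim_equal_find_date_column_index : Prop := ∀ (headers : List String), Dom_find_date_column_index headers → Spec_find_date_column_index headers (find_date_column_index headers)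

-- ===== LEMMAS AND PROOFS =====

theorem bRank_shift (cs : List String) (k : String) (r : Int) :
    bRank cs k r = (bRank cs k 0).map (fun x => x + r) := by
  induction cs generalizing r with
  | nil => simp [bRank]
  | cons c t ih =>
    simp only [bRank]
    by_cases h : k = PySem.Str.lower c
    · simp [h]
    · simp only [if_neg h]
      rw [ih (r + 1), ih (0 + 1)]
      cases bRank t k 0 <;> simp; omega

theorem bRank_succ (cs : List String) (k : String) :
    bRank cs k (0 + 1) = (bRank cs k 0).map (fun x => x + 1) := by
  rw [bRank_shift]
  cases bRank cs k 0 <;> simp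

theorem bRank_nonneg (cs : List String) (k : String) (r v : Int)
    (h : bRank cs k r = some v) : r ≤ v := by
  induction cs generalizing r with
  | nil => simp [bRank] at h
  | cons c t ih =>
    simp only [bRank] at h
    by_cases hc : k = PySem.Str.lower c
    · simp [hc] at h; omega
    · rw [if_neg hc] at h
      have := ih (r + 1) h
      omega

theorem bLoop_keep_zero (cands hs : List String) (i j : Int) :
    bLoop cands hs i (some (0, j)) = some (0, j) := by
  induction hs generalizing i with
  | nil => rfl
  | cons h t ih =>
    simp only [bLoop]
    cases hr : bRank cands (PySem.Str.lower (PySem.Str.strip h)) 0 with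
    | none => exact ih (i + 1)
    | some r =>
      have h0 : (0 : Int) ≤ r := bRank_nonneg _ _ _ _ hr
      simp only [if_neg (by omega : ¬ r < (0 : Int))]
      exact ih (i + 1)

theorem bLoop_found (c : String) (cs hs : List String) (j : Int) :
    ∀ (i : Int) (best : Option (Int × Int)),
    (∀ b, best = some b → 0 < b.1) →
    aScan (PySem.Str.lower c) (hs.map (fun h => PySem.Str.lower (PySem.Str.strip h))) i
          = some j →
    bLoop (c :: cs) hs i best = some (0, j) := by
  induction hs with
  | nil => intro i best _ hj; simp [aScan] at hj
  | cons h t ih =>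
    intro i best hb hj
    simp only [List.map, aScan] at hj
    by_cases hc : PySem.Str.lower (PySem.Str.strip h) = PySem.Str.lower c
    · rw [if_pos hc] at hj
      injection hj with hj; subst hj
      simp only [bLoop, bRank, if_pos hc]
      cases best with
      | none => exact bLoop_keep_zero _ _ _ _
      | some b =>
        have step : bLoop (c :: cs) t (i + 1)
            (if (0 : Int) < b.1 then some ((0 : Int), i) else some b) = some (0, i) := by
          rw [if_pos (hb b rfl)]
          exact bLoop_keep_zero _ _ _ _
        exact step
    · rw [if_neg hc] at hj
      simp only [bLoop, bRank, if_neg hc]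
      rw [bRank_succ]
      cases hr : bRank cs (PySem.Str.lower (PySem.Str.strip h)) 0 with
      | none => exact ih (i + 1) best hb hj
      | some r =>
        have h0 : (0 : Int) ≤ r := bRank_nonneg _ _ _ _ hr
        simp only [Option.map_some]
        cases best with
        | none =>
          refine ih (i + 1) _ ?_ hj
          rintro b hb'; injection hb' with hb'; subst hb'; simp; omega
        | some b =>
          have hbpos : 0 < b.1 := hb b rfl
          by_cases hlt : r + 1 < b.1
          · have step : bLoop (c :: cs) t (i + 1)
                (if r + 1 < b.1 then some (r + 1, i) else some b) = some (0, j) := by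
              rw [if_pos hlt]
              refine ih (i + 1) _ ?_ hj
              rintro b' hb'; injection hb' with hb'; subst hb'; simp; omega
            exact step
          · have step : bLoop (c :: cs) t (i + 1)
                (if r + 1 < b.1 then some (r + 1, i) else some b) = some (0, j) := by
              rw [if_neg hlt]
              refine ih (i + 1) _ ?_ hj
              rintro b' hb'; injection hb' with hb'; subst hb'; exact hbpos
            exact step

theorem aScan_none (c : String) (l : List String) :
    ∀ (i : Int), aScan c l i = none → ∀ x ∈ l, x ≠ c := by
  induction l with
  | nil => simp
  | cons a t ih =>
    intro i hn x hx
    simp only [aScan] at hn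
    by_cases hc : a = c
    · simp [hc] at hn
    · rw [if_neg hc] at hn
      rcases List.mem_cons.mp hx with rfl | hx'
      · exact hc
      · exact ih (i + 1) hn x hx'

theorem bLoop_shift (c : String) (cs hs : List String)
    (hne : ∀ h ∈ hs, PySem.Str.lower (PySem.Str.strip h) ≠ PySem.Str.lower c) :
    ∀ (i : Int) (best : Option (Int × Int)),
    bLoop (c :: cs) hs i (best.map (fun b => (b.1 + 1, b.2)))
      = (bLoop cs hs i best).map (fun b => (b.1 + 1, b.2)) := by
  induction hs with
  | nil => intro i best; rfl
  | cons h t ih =>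
    intro i best
    have hh := hne h (List.mem_cons_self ..)
    have ht : ∀ x ∈ t, PySem.Str.lower (PySem.Str.strip x) ≠ PySem.Str.lower c :=
      fun x hx => hne x (List.mem_cons_of_mem _ hx)
    simp only [bLoop, bRank, if_neg hh]
    rw [bRank_succ]
    cases hr : bRank cs (PySem.Str.lower (PySem.Str.strip h)) 0 with
    | none =>
      simp only [Option.map_none]
      exact ih ht (i + 1) best
    | some r =>
      simp only [Option.map_some]
      cases best with
      | none =>
        simpa using ih ht (i + 1) (some (r, i))
      | some b =>
        simp only [Option.map_some]
        by_cases hlt : r < b.1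
        · rw [if_pos (by omega : r + 1 < b.1 + 1), if_pos hlt]
          simpa using ih ht (i + 1) (some (r, i))
        · rw [if_neg (by omega : ¬ r + 1 < b.1 + 1), if_neg hlt]
          simpa using ih ht (i + 1) (some b)

theorem bLoop_nil_cands (hs : List String) (i : Int) (best : Option (Int × Int)) :
    bLoop [] hs i best = best := by
  induction hs generalizing i with
  | nil => rfl
  | cons h t ih => simpa [bLoop, bRank] using ih (i + 1)

theorem main_eq (cands hs : List String) :
    aLoop cands (hs.map (fun h => PySem.Str.lower (PySem.Str.strip h)))
      = (bLoop cands hs 0 none).map Prod.snd := by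
  induction cands with
  | nil => simp [aLoop, bLoop_nil_cands]
  | cons c cs ih =>
    simp only [aLoop]
    cases hsc : aScan (PySem.Str.lower c)
        (hs.map (fun h => PySem.Str.lower (PySem.Str.strip h))) 0 with
    | some j =>
      rw [bLoop_found c cs hs j 0 none (by rintro b ⟨⟩) hsc]
      rfl
    | none =>
      have hne : ∀ h ∈ hs, PySem.Str.lower (PySem.Str.strip h) ≠ PySem.Str.lower c := by
        intro h hh
        exact aScan_none _ _ _ hsc _ (List.mem_map_of_mem hh)
      have hsh : bLoop (c :: cs) hs 0 none
          = (bLoop cs hs 0 none).map (fun b => (b.1 + 1, b.2)) := by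
        simpa using bLoop_shift c cs hs hne 0 none
      simp only [ih, hsh]
      cases bLoop cs hs 0 none <;> simp

-- ===== VERDICT (by name: the statement is the Claim_ definition above) =====
theorem find_date_column_index_spec : Claim_equal_find_date_column_index := by
  intro headers _
  unfold Spec_find_date_column_index find_date_column_index find_date_column_index_alt
  exact main_eq DATE_COLUMN_PRIORITY headers
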